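-- pv_equiv track=rewrite | github.com/Abhilash-Singh-Thakur/inauronDSAssessment | assignment06.py | reconstruct_permutation
-- ===== SOURCE A (Python) =====
-- def reconstruct_permutation(s):
--     n = len(s)
--     perm = [0] * (n + 1)
--     low, high = 0, n
--
--     for i in range(n):
--         if s[i] == 'I':
--             perm[i] = low
--             low += 1
--         else:
--             perm[i] = high
--             high -= 1
--
--     perm[n] = low
--
--     return perm
-- ===== SOURCE B (Python) =====
-- def reconstruct_permutation(s):
--     n = len(s)
--     ic = [0]
--     for c in s:
--         ic.append(ic[-1] + (c == 'I'))
--     return [ic[i] if i < n and s[i] == 'I' else n - (i - ic[i])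
--             for i in range(n + 1)]
-- ===== Notes on version B (the rewrite author's own statement) =====
-- stated objective: alternative
-- what changed: Replaces the moving low/high pointers writing into a preallocated array with a prefix table of 'I'-counts plus a per-index arithmetic formula (perm[i] = Ibefore if s[i]=='I' else n - Dbefore), built in one comprehension.
import Mathlib
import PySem

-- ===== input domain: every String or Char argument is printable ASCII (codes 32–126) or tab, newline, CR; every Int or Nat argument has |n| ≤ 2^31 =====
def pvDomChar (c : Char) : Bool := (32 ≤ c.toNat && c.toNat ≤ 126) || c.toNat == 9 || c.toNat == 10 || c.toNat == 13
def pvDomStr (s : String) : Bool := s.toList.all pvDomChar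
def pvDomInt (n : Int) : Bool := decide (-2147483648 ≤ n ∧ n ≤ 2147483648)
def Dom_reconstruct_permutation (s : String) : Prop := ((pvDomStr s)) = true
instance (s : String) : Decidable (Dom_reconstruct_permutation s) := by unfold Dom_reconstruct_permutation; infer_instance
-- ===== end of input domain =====

-- B replaces A's moving low/high pointers with a prefix table of 'I'-counts and a per-index formula (alternative decomposition, same O(n) cost).

-- ===== PORT A =====
-- step of A's loop body: state (perm, low, high); s[i] is in range for i < n, ported via getD
def pvStepA (cs : List Char) (acc : List Int × Int × Int) (i : Nat) : List Int × Int × Int :=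
  if cs.getD i ' ' = 'I' then (acc.1.set i acc.2.1, acc.2.1 + 1, acc.2.2)
  else (acc.1.set i acc.2.2, acc.2.1, acc.2.2 - 1)

def reconstruct_permutation (s : String) : List Int :=
  let cs := s.toList
  let n := cs.length
  let st := (List.range n).foldl (pvStepA cs) (List.replicate (n + 1) 0, 0, (n : Int))
  st.1.set n st.2.1

-- ===== PORT B =====
-- ic[-1] ported as getLastD 0 (ic is never empty); s[i] is guarded by i < n, ported via getD
def reconstruct_permutation_alt (s : String) : List Int :=
  let cs := s.toList
  let n := cs.length
  let ic := cs.foldl (fun acc c => acc ++ [acc.getLastD 0 + (if c = 'I' then 1 else 0)]) ([0] : List Int)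
  (List.range (n + 1)).map (fun i =>
    if i < n ∧ cs.getD i ' ' = 'I' then ic.getD i 0
    else (n : Int) - ((i : Int) - ic.getD i 0))

-- ===== PRECONDITION & SPEC =====
def Spec_reconstruct_permutation (s : String) (out : List Int) : Prop := out = reconstruct_permutation_alt s
instance (s : String) (out : List Int) : Decidable (Spec_reconstruct_permutation s out) := by unfold Spec_reconstruct_permutation; infer_instance

-- ===== CLAIM (what is proved, stated in full; the proofs are below) =====
def Claim_equal_reconstruct_permutation : Prop := ∀ (s : String), Dom_reconstruct_permutation s → Spec_reconstruct_permutation s (reconstruct_permutation s)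

-- ===== LEMMAS AND PROOFS =====

-- number of 'I' in a list of chars
def icnt (l : List Char) : Nat := (l.filter (· = 'I')).length

-- the common closed form both ports compute
def pvVal (cs : List Char) (i : Nat) : Int :=
  if cs.getD i ' ' = 'I' then (icnt (cs.take i) : Int)
  else (cs.length : Int) - ((i : Nat) - (icnt (cs.take i) : Int))

theorem icnt_append (l m : List Char) : icnt (l ++ m) = icnt l + icnt m := by
  simp [icnt]

theorem icnt_le (l : List Char) : icnt l ≤ l.length := by
  simpa [icnt] using List.length_filter_le (· = 'I') l

-- pointwise description of set on a mapped range
theorem set_map_range (f : Nat → Int) (m k : Nat) (v : Int) :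
    ((List.range m).map f).set k v = (List.range m).map (fun i => if i = k then v else f i) := by
  apply List.ext_getElem
  · simp
  · intro i h1 h2
    rw [List.getElem_set]
    simp only [List.getElem_map, List.getElem_range]
    split
    · rename_i h; simp [h.symm]
    · rename_i h; have : i ≠ k := fun hh => h hh.symm
      simp [this]

theorem getD_map_range (f : Nat → Int) (m i : Nat) (h : i < m) :
    ((List.range m).map f).getD i 0 = f i := by
  rw [List.getD_eq_getElem?_getD, List.getElem?_map]
  simp [List.getElem?_range h]

-- B's prefix-table fold equals the table of prefix counts
theorem ic_fold (cs : List Char) :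
    cs.foldl (fun acc c => acc ++ [acc.getLastD 0 + (if c = 'I' then 1 else 0)]) ([0] : List Int)
      = (List.range (cs.length + 1)).map (fun i => (icnt (cs.take i) : Int)) := by
  induction cs using List.reverseRecOn with
  | nil => simp [icnt]
  | append_singleton l c ih =>
    rw [List.foldl_append, ih]
    have hlast : ((List.range (l.length + 1)).map (fun i => (icnt (l.take i) : Int))).getLastD 0
        = (icnt l : Int) := by
      rw [List.getLastD_eq_getLast?, List.getLast?_eq_getElem?]
      simp
    simp only [List.foldl_cons, List.foldl_nil, hlast]
    rw [List.length_append, List.length_singleton, List.range_succ (n := l.length + 1), List.map_append]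
    congr 1
    · apply List.map_congr_left
      intro i hi
      rw [List.mem_range] at hi
      rw [List.take_append_of_le_length (by omega)]
    · have hfull : List.take (l.length + 1) (l ++ [c]) = l ++ [c] :=
        List.take_of_length_le (by simp)
      simp only [List.map_cons, List.map_nil, hfull, icnt_append]
      have : icnt [c] = if c = 'I' then 1 else 0 := by
        simp only [icnt, List.filter]
        split <;> simp_all
      rw [this]
      split <;> simp

-- A's loop invariant
theorem a_inv (cs : List Char) (k : Nat) (hk : k ≤ cs.length) :
    (List.range k).foldl (pvStepA cs) (List.replicate (cs.length + 1) 0, 0, (cs.length : Int))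
      = ((List.range (cs.length + 1)).map (fun i => if i < k then pvVal cs i else 0),
         (icnt (cs.take k) : Int),
         (cs.length : Int) - ((k : Int) - (icnt (cs.take k) : Int))) := by
  induction k with
  | zero => simp [icnt]
  | succ k ih =>
    have hk' : k ≤ cs.length := by omega
    rw [List.range_succ, List.foldl_append, ih hk', List.foldl_cons, List.foldl_nil]
    have hkl : k < cs.length := by omega
    have hget : cs.getD k ' ' = cs[k] := by simp [List.getD, hkl]
    have hget' : cs[k]?.getD ' ' = cs[k] := by simp [List.getElem?_eq_getElem hkl]
    have htake : cs.take (k + 1) = cs.take k ++ [cs[k]] := by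
      rw [List.take_add_one]
      simp [hkl]
    have hicnt1 : icnt (cs.take (k + 1)) =
        icnt (cs.take k) + (if cs[k] = 'I' then 1 else 0) := by
      rw [htake, icnt_append]
      congr 1
      simp only [icnt, List.filter]
      split <;> simp_all
    have hIle : icnt (cs.take k) ≤ k := by
      have := icnt_le (cs.take k)
      simpa [List.length_take, Nat.min_le_left] using this.trans (by simp)
    by_cases hc : cs[k] = 'I'
    · simp only [pvStepA, hget, hc, if_pos rfl]
      rw [set_map_range]
      refine Prod.ext ?_ (Prod.ext ?_ ?_)
      · apply List.map_congr_left
        intro i _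
        by_cases h1 : i = k
        · subst h1
          simp [pvVal, List.getD, hget', hc]
        · by_cases h2 : i < k <;> by_cases h3 : i < k + 1 <;> simp [h1, h2, h3] <;> omega
      · simp only [hicnt1, hc, if_pos rfl]; push_cast; ring
      · simp only [hicnt1, hc, if_pos rfl]; push_cast; ring
    · simp only [pvStepA, hget, hc, if_neg hc, if_false]
      rw [set_map_range]
      refine Prod.ext ?_ (Prod.ext ?_ ?_)
      · apply List.map_congr_left
        intro i _
        by_cases h1 : i = k
        · subst h1
          simp [pvVal, List.getD, hget', hc]
        · by_cases h2 : i < k <;> by_cases h3 : i < k + 1 <;> simp [h1, h2, h3] <;> omega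
      · simp only [hicnt1, hc, if_neg hc, if_false]; push_cast; ring
      · simp only [hicnt1, hc, if_neg hc, if_false]; push_cast; ring

-- ===== VERDICT (by name: the statement is the Claim_ definition above) =====
theorem reconstruct_permutation_spec : Claim_equal_reconstruct_permutation := by
  intro s _
  unfold Spec_reconstruct_permutation reconstruct_permutation reconstruct_permutation_alt
  simp only []
  set cs := s.toList with hcs
  rw [a_inv cs cs.length le_rfl, ic_fold cs]
  rw [set_map_range]
  apply List.map_congr_left
  intro i hi
  rw [List.mem_range] at hi
  have hi' : i ≤ cs.length := by omega
  rw [getD_map_range _ _ _ (by omega)]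
  have htf : cs.take cs.length = cs := List.take_of_length_le le_rfl
  by_cases h1 : i = cs.length
  · subst h1
    have hle : (icnt cs : Int) ≤ (cs.length : Int) := by exact_mod_cast icnt_le cs
    simp only [if_pos rfl, htf]
    have : ¬ (cs.length < cs.length ∧ cs.getD cs.length ' ' = 'I') := by
      rintro ⟨h, _⟩; omega
    rw [if_neg this]
    push_cast; ring
  · have hlt : i < cs.length := by omega
    rw [if_neg h1, if_pos hlt]
    unfold pvVal
    by_cases hc : cs.getD i ' ' = 'I'
    · simp [hc, hlt]
    · simp [hc, hlt]
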